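-- pv_equiv track=rewrite | github.com/uriberger/reserach_methods_in_software_engineering | code_snippet5.py | long_code_snippet5
-- ===== SOURCE A (Python) =====
-- def long_code_snippet5(corpus, count_chars, threshold):
--     count_dics = {}
--     for count_char in count_chars:
--         count_dics[count_char] = 0
--     for cur_char in corpus:
--         if cur_char in count_chars:
--             count_dics[cur_char] = count_dics[cur_char] + 1
--     res = []
--     for count_char in count_chars:
--         if count_dics[count_char] > threshold:
--             res.append(count_char)
--
--     return res
-- ===== SOURCE B (Python) =====
-- # B: no dictionary; for each target, one direct scan of the corpus by element equality. objective: simpler.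
-- def long_code_snippet5(corpus, count_chars, threshold):
--     res = []
--     for count_char in count_chars:
--         n = 0
--         for cur_char in corpus:
--             if cur_char == count_char:
--                 n += 1
--         if n > threshold:
--             res.append(count_char)
--     return res
-- ===== Notes on version B (the rewrite author's own statement) =====
-- stated objective: simpler
-- what changed: Replaces the counting dictionary (init pass + tally pass + filter pass) with a direct per-target equality scan of the corpus inside a single loop over count_chars.
import Mathlib
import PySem

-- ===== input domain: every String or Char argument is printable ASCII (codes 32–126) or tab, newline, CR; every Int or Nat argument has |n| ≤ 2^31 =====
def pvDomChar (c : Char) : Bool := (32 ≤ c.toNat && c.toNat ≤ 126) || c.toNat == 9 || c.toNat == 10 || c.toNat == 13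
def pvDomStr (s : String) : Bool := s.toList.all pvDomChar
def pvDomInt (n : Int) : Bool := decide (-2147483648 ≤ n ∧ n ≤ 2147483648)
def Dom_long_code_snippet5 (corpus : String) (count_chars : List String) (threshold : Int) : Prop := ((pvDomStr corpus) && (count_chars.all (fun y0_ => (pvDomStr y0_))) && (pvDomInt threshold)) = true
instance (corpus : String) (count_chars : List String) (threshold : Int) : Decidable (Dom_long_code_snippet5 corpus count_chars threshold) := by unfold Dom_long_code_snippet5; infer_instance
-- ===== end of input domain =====

-- B drops A's counting dictionary and instead counts each target with a direct equality scan of the corpus; objective: simpler.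

-- ===== PORT A =====
def long_code_snippet5 (corpus : String) (count_chars : List String) (threshold : Int) : List String :=
  -- count_dics = {}; for count_char in count_chars: count_dics[count_char] = 0
  let count_dics : PySem.Dict String Int :=
    count_chars.foldl (fun d count_char => d.insert count_char 0) PySem.Dict.empty
  -- for cur_char in corpus: if cur_char in count_chars: count_dics[cur_char] += 1
  let count_dics :=
    corpus.toList.foldl (fun d c =>
      let cur_char := String.ofList [c]
      if count_chars.contains cur_char then d.modify cur_char 0 (· + 1) else d) count_dics
  -- res = []; for count_char in count_chars: if count_dics[count_char] > threshold: res.append(count_char)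
  count_chars.foldl (fun res count_char =>
    if count_dics.getD count_char 0 > threshold then res ++ [count_char] else res) []

-- ===== PORT B =====
def long_code_snippet5_alt (corpus : String) (count_chars : List String) (threshold : Int) : List String :=
  count_chars.foldl (fun res count_char =>
    -- n = 0; for cur_char in corpus: if cur_char == count_char: n += 1
    let n : Int := corpus.toList.foldl (fun n c =>
      if String.ofList [c] == count_char then n + 1 else n) 0
    if n > threshold then res ++ [count_char] else res) []

-- ===== PRECONDITION & SPEC =====
def Spec_long_code_snippet5 (corpus : String) (count_chars : List String) (threshold : Int) (out : List String) : Prop := out = long_code_snippet5_alt corpus count_chars threshold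
instance (corpus : String) (count_chars : List String) (threshold : Int) (out : List String) : Decidable (Spec_long_code_snippet5 corpus count_chars threshold out) := by unfold Spec_long_code_snippet5; infer_instance

-- ===== CLAIM (what is proved, stated in full; the proofs are below) =====
def Claim_equal_long_code_snippet5 : Prop := ∀ (corpus : String) (count_chars : List String) (threshold : Int), Dom_long_code_snippet5 corpus count_chars threshold → Spec_long_code_snippet5 corpus count_chars threshold (long_code_snippet5 corpus count_chars threshold)

-- ===== LEMMAS AND PROOFS =====

-- the initial zeroing pass gives every key the default 0 under getD
theorem getD_init_zero (cs : List String) (d : PySem.Dict String Int)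
    (hd : ∀ k, d.getD k 0 = 0) (k : String) :
    (cs.foldl (fun d c => d.insert c 0) d).getD k 0 = 0 := by
  induction cs generalizing d with
  | nil => exact hd k
  | cons c cs ih =>
    refine ih _ (fun k' => ?_)
    rw [PySem.Dict.getD_insert]
    split <;> simp [hd]

-- the guarded counting pass over the corpus characters: value at a target key k ∈ cs
theorem getD_count_pass (l : List Char) (cs : List String) (d : PySem.Dict String Int)
    (k : String) (hk : cs.contains k) :
    (l.foldl (fun d c =>
        let s := String.ofList [c]
        if cs.contains s then d.modify s 0 (· + 1) else d) d).getD k 0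
      = d.getD k 0 + ((l.map (fun c => String.ofList [c])).count k : Int) := by
  induction l generalizing d with
  | nil => simp
  | cons c l ih =>
    simp only [List.foldl_cons, List.map_cons, List.count_cons]
    by_cases hmem : cs.contains (String.ofList [c])
    · rw [if_pos hmem, ih]
      rw [PySem.Dict.getD_modify]
      by_cases he : k = String.ofList [c]
      · subst he; simp; ring
      · have hb : (String.ofList [c] == k) = false := by
          simp; exact fun h => he h.symm
        simp [hb, he]
    · rw [if_neg hmem, ih]
      have hb : (String.ofList [c] == k) = false := by
        simp; rintro rfl; exact hmem hk
      simp [hb]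

-- B's inner scan computes the same count
theorem inner_scan_count (l : List Char) (k : String) :
    (l.foldl (fun n c => if String.ofList [c] == k then n + 1 else n) (0 : Int))
      = ((l.map (fun c => String.ofList [c])).count k : Int) := by
  have h : ∀ (a : Int), (l.map (fun c => String.ofList [c])).foldl
      (fun n s => if s == k then n + 1 else n) a
      = a + ((l.map (fun c => String.ofList [c])).count k : Int) :=
    fun a => PySem.List.foldl_beq_add_one _ _ _
  have := h 0
  rw [List.foldl_map] at this
  simpa using this

-- ===== VERDICT (by name: the statement is the Claim_ definition above) =====
theorem long_code_snippet5_spec : Claim_equal_long_code_snippet5 := by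
  intro corpus count_chars threshold _
  unfold Spec_long_code_snippet5 long_code_snippet5 long_code_snippet5_alt
  apply PySem.List.foldl_congr_mem
  intro acc k hk
  have hc : count_chars.contains k := by simpa using hk
  rw [getD_count_pass corpus.toList count_chars _ k hc,
      getD_init_zero count_chars PySem.Dict.empty (fun k => by simp),
      inner_scan_count]
  simp
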